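-- pv_equiv track=rewrite | github.com/hazelian0619/graph-rag | protein/pipelines/protein_physchem/scripts/build_protein_physchem.py | prepare_sequence_for_analysis
-- ===== SOURCE A (Python) =====
-- from typing import Any, Dict, Iterable, List, Tuple
--
-- CANONICAL_AA = set("ACDEFGHIKLMNPQRSTVWY")
--
-- AA_SUBSTITUTIONS = {
--     "U": "C",  # Selenocysteine -> Cysteine (closest canonical fallback)
--     "O": "K",  # Pyrrolysine -> Lysine (closest canonical fallback)
-- }
--
-- def sanitize_sequence(sequence: str) -> str:
--     return str(sequence).strip().upper()
--
-- def prepare_sequence_for_analysis(sequence: str) -> Tuple[str, List[str]]: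
--     seq = sanitize_sequence(sequence)
--     substitutions_used: List[str] = []
--     normalized_chars: List[str] = []
--     for ch in seq:
--         if ch in CANONICAL_AA:
--             normalized_chars.append(ch)
--             continue
--         if ch in AA_SUBSTITUTIONS:
--             normalized_chars.append(AA_SUBSTITUTIONS[ch])
--             substitutions_used.append(f"{ch}->{AA_SUBSTITUTIONS[ch]}")
--             continue
--         raise ValueError(f"Unsupported amino acid '{ch}'")
--     return "".join(normalized_chars), substitutions_used
-- ===== SOURCE B (Python) =====
-- from typing import List, Tuple
--
-- CANONICAL_AA = set("ACDEFGHIKLMNPQRSTVWY")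
--
-- AA_SUBSTITUTIONS = {
--     "U": "C",
--     "O": "K",
-- }
--
-- def sanitize_sequence(sequence: str) -> str:
--     return str(sequence).strip().upper()
--
-- _TRANS = str.maketrans(AA_SUBSTITUTIONS)
--
-- def prepare_sequence_for_analysis(sequence: str) -> Tuple[str, List[str]]:
--     seq = sanitize_sequence(sequence)
--     allowed = CANONICAL_AA | set(AA_SUBSTITUTIONS)
--     for ch in seq:
--         if ch not in allowed:
--             raise ValueError(f"Unsupported amino acid '{ch}'")
--     normalized = seq.translate(_TRANS)
--     substitutions_used = [f"{ch}->{AA_SUBSTITUTIONS[ch]}" for ch in seq if ch in AA_SUBSTITUTIONS]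
--     return normalized, substitutions_used
-- ===== Notes on version B (the rewrite author's own statement) =====
-- stated objective: idiomatic
-- what changed: A's single fold that interleaves validation, character mapping and note collection is split into a validate-all pass, a translation-table mapping for the normalized string, and a comprehension for the substitution notes.
import Mathlib
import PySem

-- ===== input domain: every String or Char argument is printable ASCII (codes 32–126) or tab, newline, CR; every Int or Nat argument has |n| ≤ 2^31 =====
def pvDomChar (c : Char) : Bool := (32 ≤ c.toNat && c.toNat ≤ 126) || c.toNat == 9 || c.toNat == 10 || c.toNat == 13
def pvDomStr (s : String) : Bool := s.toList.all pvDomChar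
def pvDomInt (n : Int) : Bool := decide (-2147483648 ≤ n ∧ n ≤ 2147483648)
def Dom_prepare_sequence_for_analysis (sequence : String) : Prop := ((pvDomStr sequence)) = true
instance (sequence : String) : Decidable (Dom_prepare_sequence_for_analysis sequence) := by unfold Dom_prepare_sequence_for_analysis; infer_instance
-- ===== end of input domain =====

-- B rewrites A's single fold (validation + mapping + note collection interleaved) as an
-- idiomatic three-phase pipeline: validate all characters, translate, comprehension for notes.
-- Pre_ excludes the inputs on which A raises ValueError; there both Pythons raise.

-- shared module constants / helper (sanitize_sequence is kept unchanged)
def canonicalAA : List Char := "ACDEFGHIKLMNPQRSTVWY".toList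

def sanitize_sequence (sequence : String) : List Char :=
  PySem.Chars.upper (PySem.Chars.strip sequence.toList)

-- ===== PORT A =====
-- AA_SUBSTITUTIONS lookup (dict of two fixed keys)
def aaSub? (c : Char) : Option Char :=
  if c = 'U' then some 'C' else if c = 'O' then some 'K' else none

-- A's loop: accumulates normalized_chars and substitutions_used; none = the raise path
-- (those inputs are excluded by Pre_; the port returns ("", []) there).
def prepLoopA : List Char → List Char → List String → Option (List Char × List String)
  | [], norm, subs => some (norm, subs)
  | c :: rest, norm, subs =>
    if c ∈ canonicalAA then prepLoopA rest (norm ++ [c]) subs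
    else match aaSub? c with
      | some r => prepLoopA rest (norm ++ [r]) (subs ++ [String.mk [c, '-', '>', r]])
      | none => none

def prepare_sequence_for_analysis (sequence : String) : String × List String :=
  let seq := sanitize_sequence sequence
  match prepLoopA seq [] [] with
  | some (norm, subs) => (String.mk norm, subs)
  | none => ("", [])   -- raise ValueError: outside Pre_

-- ===== PORT B =====
def allowedAA : List Char := canonicalAA ++ ['U', 'O']

def transChar (c : Char) : Char :=
  if c = 'U' then 'C' else if c = 'O' then 'K' else c

def subNote? (c : Char) : Option String :=
  if c = 'U' then some "U->C" else if c = 'O' then some "O->K" else none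

def prepare_sequence_for_analysis_alt (sequence : String) : String × List String :=
  let seq := sanitize_sequence sequence
  if seq.all (fun c => c ∈ allowedAA) then
    (String.mk (seq.map transChar), seq.filterMap subNote?)
  else ("", [])   -- raise ValueError: outside Pre_

-- ===== PRECONDITION & SPEC =====
-- Pre_ excludes exactly the inputs on which A raises ValueError (a character of the
-- stripped, upper-cased sequence outside the 22 accepted amino-acid letters).
def Pre_prepare_sequence_for_analysis (sequence : String) : Prop :=
  (sanitize_sequence sequence).all (fun c => c ∈ allowedAA) = true
instance (sequence : String) : Decidable (Pre_prepare_sequence_for_analysis sequence) := by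
  unfold Pre_prepare_sequence_for_analysis; infer_instance

def pvWitness_prepare_sequence_for_analysis : String := " acdUo "

def Spec_prepare_sequence_for_analysis (sequence : String) (out : String × List String) : Prop :=
  out = prepare_sequence_for_analysis_alt sequence
instance (sequence : String) (out : String × List String) :
    Decidable (Spec_prepare_sequence_for_analysis sequence out) := by
  unfold Spec_prepare_sequence_for_analysis; infer_instance

-- ===== CLAIM (what is proved, stated in full; the proofs are below) =====
def Claim_equal_prepare_sequence_for_analysis : Prop :=
  ∀ (sequence : String), Dom_prepare_sequence_for_analysis sequence →
    Pre_prepare_sequence_for_analysis sequence →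
    Spec_prepare_sequence_for_analysis sequence (prepare_sequence_for_analysis sequence)

-- ===== LEMMAS AND PROOFS =====
lemma prepLoopA_ok (cs : List Char) (h : cs.all (fun c => c ∈ allowedAA) = true) :
    ∀ (norm : List Char) (subs : List String),
      prepLoopA cs norm subs = some (norm ++ cs.map transChar, subs ++ cs.filterMap subNote?) := by
  induction cs with
  | nil => intro norm subs; simp [prepLoopA]
  | cons c rest ih =>
    intro norm subs
    simp only [List.all_cons, Bool.and_eq_true] at h
    obtain ⟨hc, hrest⟩ := h
    by_cases hU : c = 'U'
    · subst hU
      rw [prepLoopA, if_neg (by decide)]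
      show prepLoopA rest (norm ++ ['C']) (subs ++ [String.mk ['U', '-', '>', 'C']]) = _
      rw [ih hrest]
      simp [transChar, subNote?]
      rfl
    · by_cases hO : c = 'O'
      · subst hO
        rw [prepLoopA, if_neg (by decide)]
        show prepLoopA rest (norm ++ ['K']) (subs ++ [String.mk ['O', '-', '>', 'K']]) = _
        rw [ih hrest]
        simp [transChar, subNote?]
        rfl
      · -- c is canonical
        have hcan : c ∈ canonicalAA := by
          simp only [decide_eq_true_eq, allowedAA, List.mem_append, List.mem_cons] at hc
          rcases hc with h1 | h2
          · exact h1
          · simp at h2; tauto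
        rw [prepLoopA, if_pos hcan]
        rw [ih hrest]
        have ht : transChar c = c := by simp [transChar, hU, hO]
        have hs : subNote? c = none := by simp [subNote?, hU, hO]
        simp [ht, hs]

-- ===== VERDICT (by name: the statement is the Claim_ definition above) =====
theorem prepare_sequence_for_analysis_spec : Claim_equal_prepare_sequence_for_analysis := by
  intro sequence _ hpre
  unfold Spec_prepare_sequence_for_analysis
  unfold Pre_prepare_sequence_for_analysis at hpre
  unfold prepare_sequence_for_analysis prepare_sequence_for_analysis_alt
  simp only [hpre, if_pos]
  rw [prepLoopA_ok _ hpre]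
  simp
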